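-- pv_equiv track=rewrite | github.com/Miguel235711/CompetitiveProgrammingAndMore | Competitive Programming 3/Section 1.4/Palidromes/401 - Palindromes/Python/main.py | getMirroredPalindromeValue
-- ===== SOURCE A (Python) =====
-- reverse={
--     'A':'A',
--     'E':'3',
--     'H':'H',
--     'I':'I',
--     'J':'L',
--     'L':'J',
--     'M':'M',
--     'O':'O',
--     'S':'2',
--     'T':'T',
--     'U':'U',
--     'V':'V',
--     'W':'W',
--     'X':'X',
--     'Y':'Y',
--     'Z':'5',
--     '1':'1',
--     '2':'S',
--     '3':'E',
--     '5':'Z',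
--     '8':'8'
-- }
--
-- def getMirroredString(s):
--     sChars = list(s)
--     for i in range(len(sChars)):
--         if s[i] in reverse:
--             sChars[i]=reverse[s[i]]
--         else:
--             return None
--     return ''.join(sChars)
--
-- def getMirroredPalindromeValue(s):
--     mirroredString = getMirroredString(s)
--     if not mirroredString:
--         return 0
--     #compared if mirroredString backwards is the same as s
--     for i in range(len(s)):
--         if s[i]!=mirroredString[len(s)-1-i]:
--             return 0
--     return 1
-- ===== SOURCE B (Python) =====
-- reverse={
--     'A':'A','E':'3','H':'H','I':'I','J':'L','L':'J','M':'M','O':'O','S':'2',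
--     'T':'T','U':'U','V':'V','W':'W','X':'X','Y':'Y','Z':'5','1':'1','2':'S',
--     '3':'E','5':'Z','8':'8'
-- }
--
-- def getMirroredPalindromeValue(s):
--     n = len(s)
--     for i in range((n + 1) // 2):
--         if reverse.get(s[n - 1 - i]) != s[i]:
--             return 0
--     return 1
-- ===== Notes on version B (the rewrite author's own statement) =====
-- stated objective: simpler
-- what changed: B replaces A's two full passes (build the whole mirrored string, then compare it reversed against s) with a single two-pointer scan over half the string that looks each back character up in the mirror table directly, building nothing.
-- intended difference: On the empty string A returns 0 (its 'if not mirroredString' falsy test conflates the empty mirrored string with a failed lookup) while B returns 1, the intended value since the empty string is trivially a mirrored palindrome. — e.g. on getMirroredPalindromeValue(""): A returns 0, B returns 1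
import Mathlib
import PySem

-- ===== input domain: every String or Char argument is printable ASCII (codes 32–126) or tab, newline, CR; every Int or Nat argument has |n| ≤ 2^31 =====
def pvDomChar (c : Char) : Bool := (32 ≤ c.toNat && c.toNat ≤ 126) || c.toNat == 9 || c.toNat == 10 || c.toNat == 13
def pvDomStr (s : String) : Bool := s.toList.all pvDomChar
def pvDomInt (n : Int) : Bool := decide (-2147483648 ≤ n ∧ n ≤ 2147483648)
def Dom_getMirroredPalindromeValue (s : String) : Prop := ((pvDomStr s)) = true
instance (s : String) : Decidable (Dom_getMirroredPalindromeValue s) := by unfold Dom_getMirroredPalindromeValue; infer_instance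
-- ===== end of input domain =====

-- B is a single two-pointer half-length scan instead of A's build-mirrored-string-then-compare;
-- on the empty string A returns 0 and B returns the intended 1 (see D_ below). Return values only; no mutation.

-- the module-level `reverse` dict
def revMap : PySem.Dict Char Char := PySem.Dict.ofList
  [('A','A'),('E','3'),('H','H'),('I','I'),('J','L'),('L','J'),('M','M'),('O','O'),('S','2'),
   ('T','T'),('U','U'),('V','V'),('W','W'),('X','X'),('Y','Y'),('Z','5'),('1','1'),('2','S'),
   ('3','E'),('5','Z'),('8','8')]

-- ===== PORT A =====
-- the for-loop of getMirroredString: map each char through `reverse`, early-return None on a miss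
def goA : List Char → Option (List Char)
  | [] => some []
  | c :: rest =>
    match PySem.Dict.get? revMap c with
    | none => none
    | some m =>
      match goA rest with
      | none => none
      | some ms => some (m :: ms)

def getMirroredString (s : String) : Option String :=
  (goA s.toList).map (fun l => String.ofList l)

-- A's comparison loop: for i in range(len(s)): if s[i] != mirrored[len(s)-1-i]: return 0  (all indices in range)
def loopA (sc mc : List Char) (i : Nat) : Int :=
  if i < sc.length then
    if sc.getD i ' ' ≠ mc.getD (sc.length - 1 - i) ' ' then 0
    else loopA sc mc (i + 1)
  else 1
termination_by sc.length - i

def getMirroredPalindromeValue (s : String) : Int :=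
  match getMirroredString s with
  | none => 0
  | some m => if m = "" then 0 else loopA s.toList m.toList 0

-- ===== PORT B =====
-- B's single loop: for i in range((n+1)//2): if reverse.get(s[n-1-i]) != s[i]: return 0  (indices in range)
def loopB (sc : List Char) (i : Nat) : Int :=
  if i < (sc.length + 1) / 2 then
    if PySem.Dict.get? revMap (sc.getD (sc.length - 1 - i) ' ') ≠ some (sc.getD i ' ') then 0
    else loopB sc (i + 1)
  else 1
termination_by (sc.length + 1) / 2 - i

def getMirroredPalindromeValue_alt (s : String) : Int := loopB s.toList 0

-- ===== PRECONDITION & SPEC =====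
-- On the empty string A returns 0 (its `if not mirroredString` falsy test conflates "" with a failed
-- lookup) while B returns 1, the intended value: the empty string is trivially a mirrored palindrome.
def D_getMirroredPalindromeValue (s : String) : Prop := s = ""
instance (s : String) : Decidable (D_getMirroredPalindromeValue s) := by unfold D_getMirroredPalindromeValue; infer_instance

def Spec_getMirroredPalindromeValue (s : String) (out : Int) : Prop :=
  ¬ D_getMirroredPalindromeValue s → out = getMirroredPalindromeValue_alt s
instance (s : String) (out : Int) : Decidable (Spec_getMirroredPalindromeValue s out) := by unfold Spec_getMirroredPalindromeValue; infer_instance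

def pvDiffWitness_getMirroredPalindromeValue : String := ""
def pvDiffWitnessOut_getMirroredPalindromeValue : Int × Int := (0, 1)

-- ===== CLAIM (what is proved, stated in full; the proofs are below) =====
def Claim_unchanged_getMirroredPalindromeValue : Prop := ∀ (s : String), Dom_getMirroredPalindromeValue s → Spec_getMirroredPalindromeValue s (getMirroredPalindromeValue s)
def Claim_changed_getMirroredPalindromeValue : Prop := Dom_getMirroredPalindromeValue (pvDiffWitness_getMirroredPalindromeValue) ∧ D_getMirroredPalindromeValue (pvDiffWitness_getMirroredPalindromeValue) ∧ getMirroredPalindromeValue (pvDiffWitness_getMirroredPalindromeValue) = pvDiffWitnessOut_getMirroredPalindromeValue.1 ∧ getMirroredPalindromeValue_alt (pvDiffWitness_getMirroredPalindromeValue) = pvDiffWitnessOut_getMirroredPalindromeValue.2 ∧ pvDiffWitnessOut_getMirroredPalindromeValue.1 ≠ pvDiffWitnessOut_getMirroredPalindromeValue.2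
def Claim_exact_getMirroredPalindromeValue : Prop := ∀ (s : String), Dom_getMirroredPalindromeValue s → D_getMirroredPalindromeValue s → getMirroredPalindromeValue s ≠ getMirroredPalindromeValue_alt s

-- ===== LEMMAS AND PROOFS =====

-- the mirror table is an involution on its key set
lemma rev_invol (a b : Char) (h : PySem.Dict.get? revMap a = some b) :
    PySem.Dict.get? revMap b = some a := by
  have hm := PySem.Dict.mem_items_of_get?_eq_some _ h
  simp only [revMap] at hm ⊢
  fin_cases hm <;> decide

lemma goA_none_iff (cs : List Char) :
    goA cs = none ↔ ∃ c ∈ cs, PySem.Dict.get? revMap c = none := by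
  induction cs with
  | nil => simp [goA]
  | cons c rest ih =>
    cases hc : PySem.Dict.get? revMap c with
    | none => simp [goA, hc]
    | some m =>
      cases hr : goA rest with
      | none =>
        simp only [goA, hc, hr]
        constructor
        · intro _
          obtain ⟨d, hd, hdn⟩ := (ih).mp hr
          exact ⟨d, List.mem_cons_of_mem _ hd, hdn⟩
        · intro _; trivial
      | some ms =>
        simp only [goA, hc, hr]
        constructor
        · intro h; exact absurd h (by simp)
        · rintro ⟨d, hd, hdn⟩
          rcases List.mem_cons.mp hd with rfl | hd'
          · rw [hc] at hdn; exact absurd hdn (by simp)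
          · exact absurd ((ih).mpr ⟨d, hd', hdn⟩) (by simp [hr])

lemma goA_some (cs m : List Char) (h : goA cs = some m) :
    m.length = cs.length ∧
      ∀ j, j < cs.length → PySem.Dict.get? revMap (cs.getD j ' ') = some (m.getD j ' ') := by
  induction cs generalizing m with
  | nil => simp [goA] at h; subst h; simp
  | cons c rest ih =>
    cases hc : PySem.Dict.get? revMap c with
    | none => simp [goA, hc] at h
    | some v =>
      cases hr : goA rest with
      | none => simp [goA, hc, hr] at h
      | some ms =>
        simp only [goA, hc, hr, Option.some.injEq] at h
        subst h
        obtain ⟨hl, hg⟩ := ih ms hr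
        refine ⟨by simp [hl], ?_⟩
        intro j hj
        cases j with
        | zero => simpa using hc
        | succ k =>
          simp only [List.getD_cons_succ]
          exact hg k (by simpa using hj)

lemma loopA_zero_or_one (sc mc : List Char) (i : Nat) :
    loopA sc mc i = 0 ∨ loopA sc mc i = 1 := by
  fun_induction loopA sc mc i with
  | case1 => left; rfl
  | case2 _ _ _ ih => exact ih
  | case3 => right; rfl

lemma loopA_one_iff (sc mc : List Char) (i : Nat) :
    loopA sc mc i = 1 ↔
      ∀ j, i ≤ j → j < sc.length → sc.getD j ' ' = mc.getD (sc.length - 1 - j) ' ' := by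
  fun_induction loopA sc mc i with
  | case1 i hi hne =>
    simp only [show (0 : Int) ≠ 1 by decide, false_iff]
    push Not
    exact ⟨i, le_refl _, hi, hne⟩
  | case2 i hi heq ih =>
    rw [ih]
    constructor
    · intro h j hij hj
      rcases Nat.eq_or_lt_of_le hij with rfl | hlt
      · simpa using heq
      · exact h j hlt hj
    · intro h j hij hj; exact h j (Nat.le_of_succ_le hij) hj
  | case3 i hi =>
    simp only [true_iff]
    intro j hij hj; omega

lemma loopB_zero_or_one (sc : List Char) (i : Nat) :
    loopB sc i = 0 ∨ loopB sc i = 1 := by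
  fun_induction loopB sc i with
  | case1 => left; rfl
  | case2 _ _ _ ih => exact ih
  | case3 => right; rfl

lemma loopB_one_iff (sc : List Char) (i : Nat) :
    loopB sc i = 1 ↔
      ∀ j, i ≤ j → j < (sc.length + 1) / 2 →
        PySem.Dict.get? revMap (sc.getD (sc.length - 1 - j) ' ') = some (sc.getD j ' ') := by
  fun_induction loopB sc i with
  | case1 i hi hne =>
    simp only [show (0 : Int) ≠ 1 by decide, false_iff]
    push Not
    exact ⟨i, le_refl _, hi, hne⟩
  | case2 i hi heq ih =>
    rw [ih]
    constructor
    · intro h j hij hj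
      rcases Nat.eq_or_lt_of_le hij with rfl | hlt
      · simpa using heq
      · exact h j hlt hj
    · intro h j hij hj; exact h j (Nat.le_of_succ_le hij) hj
  | case3 i hi =>
    simp only [true_iff]
    intro j hij hj; omega

-- every index of a nonempty list is reached by B's half scan, directly or as the back partner
lemma main_eq (s : String) (hne : s.toList ≠ []) :
    getMirroredPalindromeValue s = getMirroredPalindromeValue_alt s := by
  set cs := s.toList with hcs
  set n := cs.length with hn
  have hnpos : 0 < n := List.length_pos_of_ne_nil hne
  unfold getMirroredPalindromeValue getMirroredPalindromeValue_alt getMirroredString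
  cases hg : goA cs with
  | none =>
    -- A returns 0; show B's loop cannot be 1
    simp only [← hcs, Option.map_none]
    rcases loopB_zero_or_one cs 0 with hb | hb
    · rw [hb]
    · exfalso
      obtain ⟨c, hc, hcn⟩ := (goA_none_iff cs).mp hg
      obtain ⟨k, hk, rfl⟩ := List.getElem_of_mem hc
      have hB := (loopB_one_iff cs 0).mp hb
      have hkd : cs[k] = cs.getD k ' ' := (List.getD_eq_getElem cs ' ' hk).symm
      by_cases hhalf : k < (n + 1) / 2
      · have h1 := hB k (Nat.zero_le _) hhalf
        have h2 := rev_invol _ _ h1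
        rw [← hkd] at h2
        rw [h2] at hcn; simp at hcn
      · have hj : n - 1 - k < (n + 1) / 2 := by omega
        have h1 := hB (n - 1 - k) (Nat.zero_le _) hj
        have hidx : n - 1 - (n - 1 - k) = k := by omega
        rw [hidx] at h1
        rw [← hkd] at h1
        rw [h1] at hcn; simp at hcn
  | some m =>
    obtain ⟨hlen, hmap⟩ := goA_some cs m hg
    have hm_ne : String.ofList m ≠ "" := by
      intro h
      have hm0 : m = [] := by
        have h2 := congrArg String.toList h
        rw [String.toList_ofList] at h2
        simpa using h2
      rw [hm0] at hlen; simp at hlen; omega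
    simp only [← hcs, Option.map_some, if_neg hm_ne]
    rw [String.toList_ofList]
    rcases loopA_zero_or_one cs m 0 with ha | ha <;> rcases loopB_zero_or_one cs 0 with hb | hb
    · rw [ha, hb]
    · exfalso
      -- B = 1 → A = 1, contradicting A = 0
      have hB := (loopB_one_iff cs 0).mp hb
      -- first: ∀ k < n, get? revMap cs[k's back] = some cs[k]
      have hall : ∀ k, k < n → PySem.Dict.get? revMap (cs.getD (n - 1 - k) ' ') = some (cs.getD k ' ') := by
        intro k hk
        by_cases hhalf : k < (n + 1) / 2
        · exact hB k (Nat.zero_le _) hhalf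
        · have hj : n - 1 - k < (n + 1) / 2 := by omega
          have h1 := hB (n - 1 - k) (Nat.zero_le _) hj
          have hidx : n - 1 - (n - 1 - k) = k := by omega
          rw [hidx] at h1
          exact rev_invol _ _ h1
      have hA : loopA cs m 0 = 1 := by
        rw [loopA_one_iff]
        intro j _ hj
        have h1 := hall j hj
        have h2 := hmap (n - 1 - j) (by omega)
        rw [h2] at h1
        exact (Option.some.injEq _ _ ▸ h1).symm
      rw [hA] at ha; exact absurd ha (by decide)
    · exfalso
      -- A = 1 → B = 1, contradicting B = 0
      have hA := (loopA_one_iff cs m 0).mp ha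
      have hB : loopB cs 0 = 1 := by
        rw [loopB_one_iff]
        intro j _ hj
        have hjn : j < n := by omega
        have h1 := hA j (Nat.zero_le _) hjn
        have h2 := hmap (n - 1 - j) (by omega)
        rw [← h1] at h2
        exact h2
      rw [hB] at hb; exact absurd hb (by decide)
    · rw [ha, hb]

-- ===== VERDICT (by name: the statement is the Claim_ definition above) =====
theorem getMirroredPalindromeValue_spec : Claim_unchanged_getMirroredPalindromeValue := by
  intro s _ hD
  have hne : s.toList ≠ [] := by
    intro h
    exact hD (String.toList_eq_nil_iff.mp h)
  exact main_eq s hne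

theorem getMirroredPalindromeValue_changed : Claim_changed_getMirroredPalindromeValue := by
  unfold Claim_changed_getMirroredPalindromeValue
  refine ⟨by simp [Dom_getMirroredPalindromeValue, pvDomStr, pvDiffWitness_getMirroredPalindromeValue], rfl, ?_, ?_, by decide⟩
  · show getMirroredPalindromeValue "" = 0
    simp [getMirroredPalindromeValue, getMirroredString, goA]
  · show getMirroredPalindromeValue_alt "" = 1
    simp [getMirroredPalindromeValue_alt, loopB]

theorem getMirroredPalindromeValue_tight : Claim_exact_getMirroredPalindromeValue := by
  intro s _ hD
  simp only [D_getMirroredPalindromeValue] at hD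
  subst hD
  have hA : getMirroredPalindromeValue "" = 0 := by
    simp [getMirroredPalindromeValue, getMirroredString, goA]
  have hB : getMirroredPalindromeValue_alt "" = 1 := by
    simp [getMirroredPalindromeValue_alt, loopB]
  rw [hA, hB]; decide
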